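-- pv_equiv track=rewrite | github.com/QuHarmonics/Nexus-4-Framework-Recursive-Harmonic-Architecture | Python Code - Raw Dump/Nexus 4 Framework -IMPORTANT - Hexadecimal Harmonic Delegate Grid-checkpoint-code_3- Qu Harmonics.py | delta_expand
-- ===== SOURCE A (Python) =====
-- from typing import List, Dict
--
-- def delta_expand(triplet: List[int], depth: int, x0: int, delta0: int, total_sum: int) -> List[int]:
--     current = triplet[:]
--     for _ in range(depth):
--         next_stage = [0] * (len(current) + 1)
--         # Reverse swinging-add logic, using previous difference
--         next_stage[0] = x0  # anchor start
--         for i in range(1, len(next_stage)):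
--             next_stage[i] = next_stage[i - 1] + current[i - 1]
--         current = next_stage
--     return current
-- ===== SOURCE B (Python) =====
-- def delta_expand(triplet, depth, x0, delta0, total_sum):
--     # Closed form: after d anchored prefix-sum stages,
--     # out[j] = x0 * sum_{t<d} C(j,t) + sum_k C(j-k-1, d-1) * triplet[k]  (k <= j-d)
--     if depth <= 0:
--         return triplet[:]
--     n = len(triplet)
--     d = depth
--     m = n + d
--     # row[u] = C(u + d - 1, d - 1), built multiplicatively
--     row = [1]
--     last = 1
--     for i in range(1, m):
--         last = last * (i + d - 1) // i
--         row.append(last)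
--     out = []
--     s0 = 1  # s0 = sum_{t<d} C(j, t), starting at j = 0
--     for j in range(m):
--         acc = x0 * s0
--         kmax = min(j - d + 1, n)
--         for k in range(kmax):
--             acc += row[j - d - k] * triplet[k]
--         out.append(acc)
--         cjd = row[j - d + 1] if j >= d - 1 else 0  # C(j, d-1)
--         s0 = 2 * s0 - cjd
--     return out
-- ===== Notes on version B (the rewrite author's own statement) =====
-- stated objective: alternative
-- what changed: Replaces the depth-times repeated anchored prefix-sum pass by a closed form: each output entry is computed directly as a binomial-coefficient combination of the triplet entries and x0, with the binomial row built multiplicatively and the x0-coefficient maintained incrementally; it trades A's repeated cumulative additions for one convolution per entry.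
import Mathlib
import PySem

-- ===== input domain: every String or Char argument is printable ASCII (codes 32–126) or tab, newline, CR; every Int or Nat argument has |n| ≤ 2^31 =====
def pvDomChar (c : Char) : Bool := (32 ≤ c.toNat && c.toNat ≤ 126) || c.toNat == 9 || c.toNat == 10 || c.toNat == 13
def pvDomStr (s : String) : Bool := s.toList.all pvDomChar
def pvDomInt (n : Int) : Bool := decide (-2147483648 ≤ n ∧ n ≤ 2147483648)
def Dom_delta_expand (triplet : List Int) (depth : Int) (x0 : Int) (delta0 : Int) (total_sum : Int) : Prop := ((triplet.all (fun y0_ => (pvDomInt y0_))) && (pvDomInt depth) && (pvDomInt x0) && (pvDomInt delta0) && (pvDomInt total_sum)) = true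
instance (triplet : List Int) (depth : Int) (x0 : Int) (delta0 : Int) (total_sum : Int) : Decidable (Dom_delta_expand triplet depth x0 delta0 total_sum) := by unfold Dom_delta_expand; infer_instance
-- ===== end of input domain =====

-- B replaces A's depth-fold repeated anchored prefix-sum pass by a direct binomial-coefficient
-- closed form for each output entry (objective: alternative algorithm, same return value).

-- ===== PORT A =====
-- inner loop of A: next_stage[i] = next_stage[i-1] + current[i-1], carrying the previous entry
def pvStepGo (prev : Int) : List Int → List Int
  | [] => []
  | c :: cs => (prev + c) :: pvStepGo (prev + c) cs

def delta_expand (triplet : List Int) (depth : Int) (x0 : Int) (delta0 : Int) (total_sum : Int) : List Int :=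
  (List.range depth.toNat).foldl (fun current _ => x0 :: pvStepGo x0 current) triplet

-- ===== PORT B =====
-- Source B's row-building loop: state = (row, last); last = last * (i + d - 1) // i
def pvRowStep (d : Int) (p : List Int × Int) (i0 : Nat) : List Int × Int :=
  let i : Int := (i0 : Int) + 1
  let last := PySem.Int.floordiv (p.2 * (i + d - 1)) i
  (p.1 ++ [last], last)

-- Source B's output loop: state = (out, s0)
def pvOutStep (triplet : List Int) (d : Int) (x0 : Int) (row : List Int) (n : Nat)
    (p : List Int × Int) (j0 : Nat) : List Int × Int :=
  let j : Int := (j0 : Int)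
  let s0 := p.2
  let kmax : Int := min (j - d + 1) (n : Int)
  let acc := (List.range kmax.toNat).foldl
      (fun (acc : Int) (k : Nat) => acc + PySem.List.pyGetD row (j - d - (k : Int)) 0 * PySem.List.pyGetD triplet ((k : Int)) 0)
      (x0 * s0)
  let cjd := if d - 1 ≤ j then PySem.List.pyGetD row (j - d + 1) 0 else 0
  (p.1 ++ [acc], 2 * s0 - cjd)

def delta_expand_alt (triplet : List Int) (depth : Int) (x0 : Int) (delta0 : Int) (total_sum : Int) : List Int :=
  if depth ≤ 0 then triplet
  else
    let n := triplet.length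
    let m := n + depth.toNat
    let row := ((List.range (m - 1)).foldl (pvRowStep depth) ([1], 1)).1
    ((List.range m).foldl (pvOutStep triplet depth x0 row n) ([], 1)).1

-- ===== PRECONDITION & SPEC =====
def Spec_delta_expand (triplet : List Int) (depth : Int) (x0 : Int) (delta0 : Int) (total_sum : Int) (out : List Int) : Prop := out = delta_expand_alt triplet depth x0 delta0 total_sum
instance (triplet : List Int) (depth : Int) (x0 : Int) (delta0 : Int) (total_sum : Int) (out : List Int) : Decidable (Spec_delta_expand triplet depth x0 delta0 total_sum out) := by unfold Spec_delta_expand; infer_instance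

-- ===== CLAIM (what is proved, stated in full; the proofs are below) =====
def Claim_equal_delta_expand : Prop := ∀ (triplet : List Int) (depth : Int) (x0 : Int) (delta0 : Int) (total_sum : Int), Dom_delta_expand triplet depth x0 delta0 total_sum → Spec_delta_expand triplet depth x0 delta0 total_sum (delta_expand triplet depth x0 delta0 total_sum)

-- ===== LEMMAS AND PROOFS =====

-- the closed form: coefficient of triplet[k] in output entry j after e stages
def ccoef (e j k : Nat) : Int := if k < j then ((j - k - 1).choose (e - 1) : Int) else 0

-- the coefficient of x0 in output entry j after e stages
def s0sum (e j : Nat) : Nat := ∑ t ∈ Finset.range e, j.choose t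

-- output entry j after e stages
def pvF (triplet : List Int) (x0 : Int) (e j : Nat) : Int :=
  x0 * (s0sum e j : Int) + ∑ k ∈ Finset.range triplet.length, ccoef e j k * triplet.getD k 0

-- hockey stick
theorem pv_hockey (j t : Nat) : ∑ i ∈ Finset.range j, Nat.choose i t = Nat.choose j (t+1) := by
  induction j with
  | zero => simp
  | succ m ih => rw [Finset.sum_range_succ, ih, Nat.choose_succ_succ']; omega

theorem pv_sum_map_range (f : Nat → Int) (n : Nat) :
    ((List.range n).map f).sum = ∑ i ∈ Finset.range n, f i := by
  induction n with
  | zero => simp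
  | succ k ih => rw [List.range_succ, Finset.sum_range_succ, List.map_append]; simp [ih]

theorem pvStepGo_eq (xs : List Int) : ∀ prev : Int,
    pvStepGo prev xs = (List.range xs.length).map (fun j => prev + (xs.take (j+1)).sum) := by
  induction xs with
  | nil => intro prev; rfl
  | cons c cs ih =>
    intro prev
    simp only [pvStepGo, List.length_cons, List.range_succ_eq_map, List.map_cons, List.map_map]
    rw [ih]
    refine List.cons_eq_cons.mpr ⟨by simp, ?_⟩
    apply List.map_congr_left
    intro j _
    simp [List.take_succ_cons, add_assoc, Function.comp]

theorem pvStep_eq (xs : List Int) (x0 : Int) :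
    x0 :: pvStepGo x0 xs = (List.range (xs.length+1)).map (fun j => x0 + (xs.take j).sum) := by
  rw [pvStepGo_eq, List.range_succ_eq_map, List.map_cons, List.map_map]
  simp

theorem pv_take_sum (xs : List Int) : ∀ j : Nat,
    (xs.take j).sum = ∑ k ∈ Finset.range xs.length, if k < j then xs.getD k 0 else 0 := by
  induction xs with
  | nil => intro j; simp
  | cons x cs ih =>
    intro j
    cases j with
    | zero => simp
    | succ j' =>
      rw [List.take_succ_cons, List.sum_cons, List.length_cons, Finset.sum_range_succ']
      simp [ih j']
      omega

-- step on the x0-coefficient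
theorem pv_s0_step (e j : Nat) : 1 + ∑ i ∈ Finset.range j, s0sum e i = s0sum (e+1) j := by
  unfold s0sum
  rw [Finset.sum_comm, Finset.sum_range_succ']
  simp only [pv_hockey]
  simp [Nat.choose_zero_right, add_comm]

-- step on the triplet coefficients (needs e ≥ 1)
theorem pv_cc_step (e j k : Nat) (he : 1 ≤ e) :
    ∑ i ∈ Finset.range j, ccoef e i k = ccoef (e+1) j k := by
  unfold ccoef
  by_cases hk : k < j
  · rw [if_pos hk]
    rw [← Finset.sum_range_add_sum_Ico _ (show k+1 ≤ j by omega)]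
    rw [Finset.sum_eq_zero (fun i hi => by rw [if_neg]; simp at hi; omega)]
    rw [Finset.sum_Ico_eq_sum_range, zero_add]
    have : ∀ u ∈ Finset.range (j - (k+1)),
        (if k < k + 1 + u then (((k + 1 + u) - k - 1).choose (e - 1) : Int) else 0)
          = ((u.choose (e-1) : Nat) : Int) := by
      intro u _
      rw [if_pos (by omega)]
      congr 2
      omega
    rw [Finset.sum_congr rfl this, ← Nat.cast_sum, pv_hockey]
    have h1 : e - 1 + 1 = (e + 1) - 1 := by omega
    have h2 : j - (k+1) = j - k - 1 := by omega
    rw [h1, h2]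
  · rw [if_neg hk, Finset.sum_eq_zero]
    intro i hi
    rw [if_neg]
    simp at hi
    omega

-- the key inductive step: one anchored prefix-sum stage advances the closed form
theorem pv_F_step (triplet : List Int) (x0 : Int) (e j : Nat) (he : 1 ≤ e) :
    x0 + ∑ i ∈ Finset.range j, pvF triplet x0 e i = pvF triplet x0 (e+1) j := by
  unfold pvF
  rw [Finset.sum_add_distrib, ← Finset.mul_sum, Finset.sum_comm]
  have hc : ∀ k ∈ Finset.range triplet.length,
      ∑ i ∈ Finset.range j, ccoef e i k * triplet.getD k 0
        = ccoef (e+1) j k * triplet.getD k 0 := by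
    intro k _
    rw [← Finset.sum_mul, pv_cc_step e j k he]
  rw [Finset.sum_congr rfl hc]
  have hs0 : ((s0sum (e+1) j : Nat) : Int) = 1 + ∑ i ∈ Finset.range j, ((s0sum e i : Nat) : Int) := by
    rw [← pv_s0_step e j]
    push_cast
    ring
  rw [hs0]
  ring

-- A's iteration in closed form
theorem pv_A_char (triplet : List Int) (x0 : Int) : ∀ e : Nat,
    (List.range (e+1)).foldl (fun current _ => x0 :: pvStepGo x0 current) triplet
      = (List.range (triplet.length + (e+1))).map (pvF triplet x0 (e+1)) := by
  intro e
  induction e with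
  | zero =>
    rw [show (0:Nat)+1 = 1 from rfl, List.range_one]
    simp only [List.foldl_cons, List.foldl_nil]
    rw [pvStep_eq]
    apply List.map_congr_left
    intro j _
    unfold pvF s0sum ccoef
    rw [pv_take_sum]
    simp [Nat.choose_zero_right]
  | succ e' ih =>
    rw [List.range_succ, List.foldl_append, List.foldl_cons, List.foldl_nil, ih, pvStep_eq]
    rw [List.length_map, List.length_range]
    have hlen : triplet.length + (e' + 1) + 1 = triplet.length + (e' + 1 + 1) := by omega
    rw [hlen]
    apply List.map_congr_left
    intro j hj
    simp only [List.mem_range] at hj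
    have htake : ((List.range (triplet.length + (e'+1))).map (pvF triplet x0 (e'+1))).take j
        = (List.range j).map (pvF triplet x0 (e'+1)) := by
      rw [← List.map_take, List.take_range, Nat.min_eq_left (by omega)]
    rw [htake, pv_sum_map_range, pv_F_step triplet x0 (e'+1) j (by omega)]

-- the row built by B's first loop
theorem pv_row_char (e1 : Nat) (he : 1 ≤ e1) : ∀ t : Nat,
    (List.range t).foldl (pvRowStep (e1 : Int)) ([1], 1)
      = ((List.range (t+1)).map (fun u => (((u + e1 - 1).choose (e1-1) : Nat) : Int)),
         (((t + e1 - 1).choose (e1-1) : Nat) : Int)) := by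
  intro t
  induction t with
  | zero =>
    simp
  | succ t' ih =>
    rw [List.range_succ, List.foldl_append, List.foldl_cons, List.foldl_nil, ih]
    unfold pvRowStep
    have hkey : ((((t' + e1 - 1).choose (e1-1) : Nat) : Int) * ((t' : Int) + 1 + (e1 : Int) - 1))
        = ((t' : Int) + 1) * (((t' + e1).choose (e1-1) : Nat) : Int) := by
      have hnat : (t' + e1) * ((t' + e1 - 1).choose (e1-1)) = (t' + 1) * ((t' + e1).choose (e1-1)) := by
        have h1 : (t' + e1 - 1).choose (e1 - 1) = (t' + e1 - 1).choose t' := by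
          rw [← Nat.choose_symm (show t' ≤ t' + e1 - 1 by omega)]
          congr 1
          omega
        have h2 : (t' + e1).choose (t' + 1) = (t' + e1).choose (e1 - 1) := by
          rw [← Nat.choose_symm (show t' + 1 ≤ t' + e1 by omega)]
          congr 1
          omega
        have h3 := Nat.add_one_mul_choose_eq (t' + e1 - 1) t'
        have h4 : t' + e1 - 1 + 1 = t' + e1 := by omega
        rw [h4] at h3
        rw [h1, ← h2]
        calc (t' + e1) * (t' + e1 - 1).choose t' = (t' + e1).choose (t' + 1) * (t' + 1) := h3
          _ = (t' + 1) * (t' + e1).choose (t' + 1) := by ring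
      have hc2 : ((t' : Int) + 1 + (e1 : Int) - 1) = ((t' + e1 : Nat) : Int) := by push_cast; ring
      rw [hc2, show ((t' : Int) + 1) = ((t' + 1 : Nat) : Int) by push_cast; ring]
      exact_mod_cast (by rw [Nat.mul_comm]; exact hnat :
        (t' + e1 - 1).choose (e1-1) * (t' + e1) = (t' + 1) * (t' + e1).choose (e1-1))
    have hdiv : PySem.Int.floordiv ((((t' + e1 - 1).choose (e1-1) : Nat) : Int) * ((t' : Int) + 1 + (e1 : Int) - 1)) ((t' : Int) + 1)
        = (((t' + e1).choose (e1-1) : Nat) : Int) := by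
      rw [hkey, PySem.Int.floordiv_eq_ediv_of_pos (by positivity), Int.mul_ediv_cancel_left _ (by positivity)]
    simp only [hdiv]
    simp only [Prod.mk.injEq]
    refine ⟨?_, ?_⟩
    · rw [List.range_succ (n := t'+1), List.map_append]
      congr 2
      show _ = ((( (t' + 1) + e1 - 1).choose (e1 - 1) : Nat) : Int)
      rw [show t' + 1 + e1 - 1 = t' + e1 by omega]
    · congr 2
      omega

-- s0's Pascal-style recurrence, as used by B's incremental update
theorem pv_s0_rec (j : Nat) : ∀ e : Nat, s0sum (e+1) (j+1) + j.choose e = 2 * s0sum (e+1) j := by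
  intro e
  induction e with
  | zero => simp [s0sum]
  | succ e' ih =>
    unfold s0sum
    rw [Finset.sum_range_succ, Finset.sum_range_succ (f := fun t => j.choose t)]
    have hpascal : (j+1).choose (e'+1) = j.choose e' + j.choose (e'+1) := Nat.choose_succ_succ' j e'
    unfold s0sum at ih
    omega

theorem pv_s0_one (e1 : Nat) (he : 1 ≤ e1) : s0sum e1 0 = 1 := by
  unfold s0sum
  rw [show e1 = (e1 - 1) + 1 by omega, Finset.sum_range_succ']
  rw [Finset.sum_eq_zero (fun t _ => Nat.choose_eq_zero_of_lt (by omega))]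
  simp

-- B's output loop in closed form
theorem pv_out_char (triplet : List Int) (x0 : Int) (e1 : Nat) (he : 1 ≤ e1) :
    ∀ t : Nat, t ≤ triplet.length + e1 →
    (List.range t).foldl
        (pvOutStep triplet (e1 : Int) x0
          ((List.range (triplet.length + e1)).map (fun u => (((u + e1 - 1).choose (e1-1) : Nat) : Int)))
          triplet.length) ([], 1)
      = ((List.range t).map (pvF triplet x0 e1), ((s0sum e1 t : Nat) : Int)) := by
  intro t
  induction t with
  | zero =>
    intro _
    simp [pv_s0_one e1 he]
  | succ t' ih =>
    intro ht
    have hm : t' < triplet.length + e1 := by omega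
    rw [List.range_succ, List.foldl_append, List.foldl_cons, List.foldl_nil, ih (by omega)]
    simp only [pvOutStep]
    -- the inner accumulation is the closed-form entry pvF e1 t'
    have hkmax : (min ((t' : Int) - (e1 : Int) + 1) ((triplet.length : Nat) : Int)).toNat
        = min (t' + 1 - e1) triplet.length := by omega
    have hacc : (List.range (min ((t' : Int) - (e1 : Int) + 1) ((triplet.length : Nat) : Int)).toNat).foldl
        (fun (acc : Int) (k : Nat) => acc + PySem.List.pyGetD ((List.range (triplet.length + e1)).map (fun u => (((u + e1 - 1).choose (e1-1) : Nat) : Int))) ((t' : Int) - (e1 : Int) - (k : Int)) 0 * PySem.List.pyGetD triplet ((k : Int)) 0)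
        (x0 * ((s0sum e1 t' : Nat) : Int)) = pvF triplet x0 e1 t' := by
      rw [hkmax, PySem.List.foldl_add, pv_sum_map_range]
      have hterm : ∀ k ∈ Finset.range (min (t' + 1 - e1) triplet.length),
          PySem.List.pyGetD ((List.range (triplet.length + e1)).map (fun u => (((u + e1 - 1).choose (e1-1) : Nat) : Int))) ((t' : Int) - (e1 : Int) - (k : Int)) 0 * PySem.List.pyGetD triplet ((k : Int)) 0
            = ccoef e1 t' k * triplet.getD k 0 := by
        intro k hk
        simp only [Finset.mem_range] at hk
        have hk1 : k + e1 ≤ t' := by omega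
        have hidx : (t' : Int) - (e1 : Int) - (k : Int) = ((t' - e1 - k : Nat) : Int) := by omega
        rw [hidx, PySem.List.pyGetD_natCast, PySem.List.pyGetD_natCast,
            PySem.List.getD_map_range _ (triplet.length + e1) (t' - e1 - k) 0 (by omega)]
        rw [show t' - e1 - k + e1 - 1 = t' - k - 1 by omega]
        unfold ccoef
        rw [if_pos (by omega)]
      rw [Finset.sum_congr rfl hterm]
      unfold pvF
      congr 1
      apply Finset.sum_subset
      · intro x hx
        simp only [Finset.mem_range] at hx ⊢
        omega
      · intro k hk hk2
        simp only [Finset.mem_range] at hk hk2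
        have hge : t' + 1 - e1 ≤ k := by omega
        unfold ccoef
        by_cases hkt : k < t'
        · rw [if_pos hkt, Nat.choose_eq_zero_of_lt (by omega)]
          simp
        · rw [if_neg hkt]
          simp
    rw [hacc]
    -- the s0 update matches the Pascal recurrence
    have hcjd : (if (e1 : Int) - 1 ≤ (t' : Int) then PySem.List.pyGetD ((List.range (triplet.length + e1)).map (fun u => (((u + e1 - 1).choose (e1-1) : Nat) : Int))) ((t' : Int) - (e1 : Int) + 1) 0 else 0)
        = ((t'.choose (e1-1) : Nat) : Int) := by
      by_cases hc : (e1 : Int) - 1 ≤ (t' : Int)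
      · rw [if_pos hc]
        have hidx : (t' : Int) - (e1 : Int) + 1 = ((t' + 1 - e1 : Nat) : Int) := by omega
        rw [hidx, PySem.List.pyGetD_natCast,
            PySem.List.getD_map_range _ (triplet.length + e1) (t' + 1 - e1) 0 (by omega)]
        congr 2
        omega
      · rw [if_neg hc, Nat.choose_eq_zero_of_lt (by omega)]
        simp
    rw [hcjd]
    simp only [Prod.mk.injEq]
    refine ⟨?_, ?_⟩
    · rw [List.map_append]
      rfl
    · have hrec := pv_s0_rec t' (e1 - 1)
      rw [show e1 - 1 + 1 = e1 by omega] at hrec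
      have h2 : ((s0sum e1 (t'+1) : Nat) : Int) + ((t'.choose (e1-1) : Nat) : Int) = 2 * ((s0sum e1 t' : Nat) : Int) := by
        exact_mod_cast hrec
      linarith

-- A in closed form, packaged
theorem pv_A_full (triplet : List Int) (depth x0 delta0 total_sum : Int) (hd : ¬ depth ≤ 0) :
    delta_expand triplet depth x0 delta0 total_sum
      = (List.range (triplet.length + depth.toNat)).map (pvF triplet x0 depth.toNat) := by
  obtain ⟨e, hee⟩ : ∃ e, depth.toNat = e + 1 := ⟨depth.toNat - 1, by omega⟩
  unfold delta_expand
  rw [hee]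
  exact pv_A_char triplet x0 e

-- B in closed form, packaged
theorem pv_B_full (triplet : List Int) (depth x0 delta0 total_sum : Int) (hd : ¬ depth ≤ 0) :
    delta_expand_alt triplet depth x0 delta0 total_sum
      = (List.range (triplet.length + depth.toNat)).map (pvF triplet x0 depth.toNat) := by
  have he : 1 ≤ depth.toNat := by omega
  obtain ⟨e1, rfl⟩ : ∃ e1 : Nat, depth = (e1 : Int) := ⟨depth.toNat, by omega⟩
  simp only [Int.toNat_natCast] at he ⊢
  unfold delta_expand_alt
  rw [if_neg hd]
  show ((List.range (triplet.length + e1)).foldl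
      (pvOutStep triplet (e1 : Int) x0
        (((List.range (triplet.length + e1 - 1)).foldl (pvRowStep (e1 : Int)) ([1], 1)).1)
        triplet.length) ([], 1)).1
    = (List.range (triplet.length + e1)).map (pvF triplet x0 e1)
  rw [pv_row_char e1 he (triplet.length + e1 - 1)]
  rw [show triplet.length + e1 - 1 + 1 = triplet.length + e1 by omega]
  rw [pv_out_char triplet x0 e1 he (triplet.length + e1) (le_refl _)]

-- ===== VERDICT (by name: the statement is the Claim_ definition above) =====
theorem delta_expand_spec : Claim_equal_delta_expand := by
  intro triplet depth x0 delta0 total_sum _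
  unfold Spec_delta_expand
  by_cases hd : depth ≤ 0
  · unfold delta_expand delta_expand_alt
    rw [if_pos hd, show depth.toNat = 0 by omega]
    rfl
  · rw [pv_A_full triplet depth x0 delta0 total_sum hd, pv_B_full triplet depth x0 delta0 total_sum hd]
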